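-- pv_equiv track=rewrite | github.com/tuanngocfun/DNA_storage_locally_balance | M3_work/construction2_fsm.py | _would_create_violation
-- ===== SOURCE A (Python) =====
-- def _would_create_violation(last_bits: str, new_output: str) -> bool:
--     """Check if appending new_output to last_bits would create run violations"""
--     if not last_bits:
--         return False
--     combined = last_bits + new_output
--     start_pos = max(0, len(last_bits) - 3)
--     for i in range(start_pos, len(combined) - 3):
--         window = combined[i:i + 4]
--         if window == '0000' or window == '1111':
--             return True
--         wt = window.count('1')
--         if wt < 1 or wt > 3:
--             return True
--     return False
-- ===== SOURCE B (Python) =====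
-- def _would_create_violation(last_bits: str, new_output: str) -> bool:
--     """Single-pass run-length scan: a 4-window with '1'-count 0 or 4 is exactly
--     a run of 4 consecutive characters of the same class (== '1' or not)."""
--     if not last_bits:
--         return False
--     region = (last_bits + new_output)[max(0, len(last_bits) - 3):]
--     prev = None
--     run = 0
--     for c in region:
--         cls = (c == '1')
--         run = run + 1 if prev == cls else 1
--         prev = cls
--         if run >= 4:
--             return True
--     return False
-- ===== Notes on version B (the rewrite author's own statement) =====
-- stated objective: alternative
-- what changed: Replaces the overlapping 4-window slicing with per-window '1'-counting by a single left-to-right run-length scan (previous class + run counter, reset on class change, report at run 4) over the same region.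
import Mathlib
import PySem

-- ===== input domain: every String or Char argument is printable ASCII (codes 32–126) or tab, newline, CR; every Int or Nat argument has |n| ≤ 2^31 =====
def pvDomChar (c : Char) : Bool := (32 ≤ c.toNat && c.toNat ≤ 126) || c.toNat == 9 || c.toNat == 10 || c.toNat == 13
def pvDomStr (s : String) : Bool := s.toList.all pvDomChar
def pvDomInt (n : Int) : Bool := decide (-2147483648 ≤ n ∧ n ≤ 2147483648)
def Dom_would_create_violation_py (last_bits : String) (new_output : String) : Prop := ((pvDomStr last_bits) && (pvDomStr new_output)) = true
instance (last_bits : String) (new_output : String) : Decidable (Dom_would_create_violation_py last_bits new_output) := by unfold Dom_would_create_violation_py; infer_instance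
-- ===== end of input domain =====

-- B replaces A's overlapping 4-window slicing and per-window weight counting with a single-pass
-- run-length scan over the same region (alternative decomposition; same return value).

-- ===== PORT A =====
-- the for-loop over range(start_pos, len(combined) - 3), body in Python order
def wcvA_loop (combined : List Char) : List Int → Bool
  | [] => false
  | i :: rest =>
    let window := PySem.List.slice combined (some i) (some (i + 4))
    if window = "0000".toList ∨ window = "1111".toList then true
    else
      let wt := PySem.Chars.count window "1".toList
      if wt < 1 ∨ 3 < wt then true
      else wcvA_loop combined rest

def would_create_violation_py (last_bits : String) (new_output : String) : Bool :=
  if last_bits.toList = [] then false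
  else
    let combined := last_bits.toList ++ new_output.toList
    let start_pos : Int := max 0 ((last_bits.toList.length : Int) - 3)
    wcvA_loop combined (PySem.List.pyRange start_pos ((combined.length : Int) - 3))

-- ===== PORT B =====
-- the for-loop over region with state (prev, run); returns True as soon as run reaches 4
def wcvB_loop : List Char → Option Bool → Nat → Bool
  | [], _, _ => false
  | c :: rest, prev, run =>
    let cls := c == '1'
    let run' := if prev = some cls then run + 1 else 1
    if 4 ≤ run' then true else wcvB_loop rest (some cls) run'

-- region = (last_bits + new_output)[max(0, len(last_bits) - 3):]; Nat subtraction is exactly the max-0 clamp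
def would_create_violation_py_alt (last_bits : String) (new_output : String) : Bool :=
  if last_bits.toList = [] then false
  else
    let region := (last_bits.toList ++ new_output.toList).drop (last_bits.toList.length - 3)
    wcvB_loop region none 0

-- ===== PRECONDITION & SPEC =====
def Spec_would_create_violation_py (last_bits : String) (new_output : String) (out : Bool) : Prop := out = would_create_violation_py_alt last_bits new_output
instance (last_bits : String) (new_output : String) (out : Bool) : Decidable (Spec_would_create_violation_py last_bits new_output out) := by unfold Spec_would_create_violation_py; infer_instance

-- ===== CLAIM (what is proved, stated in full; the proofs are below) =====
def Claim_equal_would_create_violation_py : Prop := ∀ (last_bits : String) (new_output : String), Dom_would_create_violation_py last_bits new_output → Spec_would_create_violation_py last_bits new_output (would_create_violation_py last_bits new_output)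

-- ===== LEMMAS AND PROOFS =====

-- proof-side characterisation: some 4 consecutive characters agree on the class (· == '1')
def sameCls (p : Bool) (c : Char) : Bool := (c == '1') == p

def prefRun (p : Bool) : Nat → List Char → Bool
  | 0, _ => true
  | _ + 1, [] => false
  | k + 1, c :: cs => sameCls p c && prefRun p k cs

def u4 : List Char → Bool
  | a :: b :: c :: d :: rest =>
      (sameCls (a == '1') b && sameCls (a == '1') c && sameCls (a == '1') d) || u4 (b :: c :: d :: rest)
  | _ => false

theorem u4_short (cs : List Char) (h : cs.length < 4) : u4 cs = false := by
  match cs with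
  | [] => rfl
  | [_] => rfl
  | [_, _] => rfl
  | [_, _, _] => rfl
  | _ :: _ :: _ :: _ :: _ => simp at h; omega

theorem prefRun_long (p : Bool) (k : Nat) (cs : List Char) (h : cs.length < k) :
    prefRun p k cs = false := by
  induction cs generalizing k with
  | nil => cases k with
    | zero => simp at h
    | succ k => rfl
  | cons c cs ih =>
    cases k with
    | zero => simp at h
    | succ k => simp only [prefRun, Bool.and_eq_false_iff]; right; exact ih k (by simpa using h)

theorem prefRun_mono (p : Bool) (j k : Nat) (cs : List Char) (hjk : j ≤ k)
    (h : prefRun p k cs = true) : prefRun p j cs = true := by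
  induction k generalizing j cs with
  | zero => interval_cases j; exact h
  | succ k ih =>
    cases cs with
    | nil => simp [prefRun] at h
    | cons c cs =>
      simp only [prefRun, Bool.and_eq_true] at h
      cases j with
      | zero => rfl
      | succ j => simp only [prefRun, Bool.and_eq_true]; exact ⟨h.1, ih j cs (by omega) h.2⟩

theorem u4_cons (c : Char) (cs : List Char) :
    u4 (c :: cs) = (prefRun (c == '1') 3 cs || u4 cs) := by
  match cs with
  | [] => rfl
  | [b] => simp [u4_short, prefRun_long]
  | [b, e] => simp [u4_short, prefRun_long]
  | b :: e :: f :: rest => simp [u4, prefRun, sameCls, Bool.and_assoc]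

theorem wcvB_some (cs : List Char) : ∀ (p : Bool) (r : Nat), 1 ≤ r → r ≤ 3 →
    wcvB_loop cs (some p) r = (prefRun p (4 - r) cs || u4 cs) := by
  induction cs with
  | nil =>
    intro p r h1 h3
    have h4 : (4:Nat) - r = ((4:Nat) - r - 1) + 1 := by omega
    rw [h4]
    rfl
  | cons c cs ih =>
    intro p r h1 h3
    by_cases hc : (c == '1') = p
    · by_cases hr : r = 3
      · subst hr
        have hpre : prefRun p 1 (c :: cs) = true := by simp [prefRun, sameCls, hc]
        simp [wcvB_loop, hc, hpre]
      · have hstep : wcvB_loop (c :: cs) (some p) r = wcvB_loop cs (some p) (r + 1) := by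
          simp [wcvB_loop, hc, show ¬(4 ≤ r + 1) by omega]
        rw [hstep, ih p (r + 1) (by omega) (by omega)]
        have hpre : prefRun p (4 - r) (c :: cs) = prefRun p (4 - (r + 1)) cs := by
          have h4 : (4:Nat) - r = (4 - (r + 1)) + 1 := by omega
          rw [h4]; simp [prefRun, sameCls, hc]
        rw [u4_cons, hc, hpre]
        by_cases hq : prefRun p 3 cs = true
        · simp [hq]
          exact Or.inl (prefRun_mono p (3 - r) 3 cs (by omega) hq)
        · simp [Bool.eq_false_iff.mpr hq]
    · have hstep : wcvB_loop (c :: cs) (some p) r = wcvB_loop cs (some (c == '1')) 1 := by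
        simp [wcvB_loop, show ¬ p = (c == '1') from fun h => hc h.symm]
      rw [hstep, ih (c == '1') 1 (by omega) (by omega)]
      have hpre : prefRun p (4 - r) (c :: cs) = false := by
        have h4 : (4:Nat) - r = ((4:Nat) - r - 1) + 1 := by omega
        rw [h4]; simp [prefRun, sameCls, hc]
      rw [u4_cons, hpre]
      simp

theorem wcvB_none (cs : List Char) : wcvB_loop cs none 0 = u4 cs := by
  cases cs with
  | nil => rfl
  | cons c cs =>
    have hstep : wcvB_loop (c :: cs) none 0 = wcvB_loop cs (some (c == '1')) 1 := by
      simp [wcvB_loop]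
    rw [hstep, wcvB_some cs (c == '1') 1 (by omega) (by omega), u4_cons]

-- A's window test on a 4-character window holds exactly when all four characters share a class
theorem cond_iff (a b c d : Char) :
    (([a,b,c,d] = "0000".toList ∨ [a,b,c,d] = "1111".toList) ∨
      (PySem.Chars.count [a,b,c,d] "1".toList < 1 ∨ 3 < PySem.Chars.count [a,b,c,d] "1".toList))
    ↔ (sameCls (a == '1') b && sameCls (a == '1') c && sameCls (a == '1') d) = true := by
  by_cases ha : a = '1' <;> by_cases hb : b = '1' <;> by_cases hc : c = '1' <;> by_cases hd : d = '1' <;>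
    simp [ha, hb, hc, hd, sameCls, PySem.Chars.count, PySem.Chars.count.go, List.isPrefixOf, @eq_comm Char]

theorem wcvA_key (combined : List Char) : ∀ (n s : Nat), combined.length - s ≤ n →
    wcvA_loop combined (PySem.List.pyRange (s : Int) ((combined.length : Int) - 3)) = u4 (combined.drop s) := by
  intro n
  induction n with
  | zero =>
    intro s hs
    rw [PySem.List.pyRange_one_eq_nil (by omega), u4_short _ (by simp; omega)]
    rfl
  | succ n ih =>
    intro s hs
    by_cases hlen : combined.length < s + 4
    · rw [PySem.List.pyRange_one_eq_nil (by omega), u4_short _ (by simp; omega)]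
      rfl
    · have h4 : 4 ≤ (combined.drop s).length := by simp; omega
      match hdrop : combined.drop s with
      | [] | [_] | [_, _] | [_, _, _] => rw [hdrop] at h4; simp at h4
      | a :: b :: c :: d :: rest =>
        have hw : PySem.List.slice combined (some (s : Int)) (some ((s : Int) + 4)) = [a, b, c, d] := by
          have h := PySem.List.slice_natCast_add combined s 4
          push_cast at h
          rw [h, hdrop]
          simp
        rw [PySem.List.pyRange_one_cons (by omega : (s : Int) < (combined.length : Int) - 3)]
        have hnext : (s : Int) + 1 = ((s + 1 : Nat) : Int) := by push_cast; ring
        have hdrop1 : combined.drop (s + 1) = b :: c :: d :: rest := by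
          have : combined.drop (s + 1) = (combined.drop s).drop 1 := by
            rw [List.drop_drop]
          rw [this, hdrop]; rfl
        simp only [wcvA_loop, hw]
        by_cases hP1 : [a, b, c, d] = "0000".toList ∨ [a, b, c, d] = "1111".toList
        · rw [if_pos hP1, u4_cons a (b :: c :: d :: rest)]
          have hpt : prefRun (a == '1') 3 (b :: c :: d :: rest) = true := by
            have h' := (cond_iff a b c d).mp (Or.inl hP1)
            simp [prefRun, sameCls] at h' ⊢
            tauto
          simp [hpt]
        · rw [if_neg hP1]
          by_cases hP2 : PySem.Chars.count [a, b, c, d] "1".toList < 1 ∨ 3 < PySem.Chars.count [a, b, c, d] "1".toList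
          · rw [if_pos hP2, u4_cons a (b :: c :: d :: rest)]
            have hpt : prefRun (a == '1') 3 (b :: c :: d :: rest) = true := by
              have h' := (cond_iff a b c d).mp (Or.inr hP2)
              simp [prefRun, sameCls] at h' ⊢
              tauto
            simp [hpt]
          · rw [if_neg hP2, hnext, ih (s + 1) (by omega), hdrop1, u4_cons a (b :: c :: d :: rest)]
            have hpf : prefRun (a == '1') 3 (b :: c :: d :: rest) = false := by
              have h' : ¬ (sameCls (a == '1') b && sameCls (a == '1') c && sameCls (a == '1') d) = true :=
                fun h => (by tauto : ¬ _) ((cond_iff a b c d).mpr h)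
              simp [prefRun, sameCls] at h' ⊢
              tauto
            simp [hpf]

-- ===== VERDICT (by name: the statement is the Claim_ definition above) =====
theorem would_create_violation_py_spec : Claim_equal_would_create_violation_py := by
  intro last_bits new_output _
  unfold Spec_would_create_violation_py would_create_violation_py would_create_violation_py_alt
  by_cases h : last_bits.toList = []
  · simp [h]
  · simp only [h, if_false]
    rw [wcvB_none]
    have hmax : max 0 ((last_bits.toList.length : Int) - 3) = ((last_bits.toList.length - 3 : Nat) : Int) := by
      omega
    rw [hmax, wcvA_key _ ((last_bits.toList ++ new_output.toList).length) _ (by omega)]
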